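-- pv_equiv track=rewrite | github.com/jjmgoss/autonomous-product-development | scripts/check_repo_readiness.py | parse_boundary_fields
-- ===== SOURCE A (Python) =====
-- def parse_boundary_fields(text: str) -> tuple[str, str]:
--     boundary_result = ""
--     exception_note = ""
--     for raw_line in text.splitlines():
--         line = raw_line.strip()
--         lower = line.lower()
--         if lower.startswith("- boundary result:"):
--             boundary_result = line.split(":", 1)[1].strip()
--         if lower.startswith("- exception note:"):
--             exception_note = line.split(":", 1)[1].strip()
--     return boundary_result, exception_note
-- ===== SOURCE B (Python) =====
-- def parse_boundary_fields(text: str) -> tuple[str, str]: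
--     def last_value(prefix: str) -> str:
--         # scan lines from the end; first match in reverse order == last match
--         for raw_line in reversed(text.splitlines()):
--             line = raw_line.strip()
--             if line.lower().startswith(prefix):
--                 return line.split(":", 1)[1].strip()
--         return ""
--     return last_value("- boundary result:"), last_value("- exception note:")
-- ===== Notes on version B (the rewrite author's own statement) =====
-- stated objective: simpler
-- what changed: Replaces A's single fused forward loop mutating two accumulators with a small helper that scans the lines in reverse and returns at the first match (last-match-wins), called once per field.
import Mathlib
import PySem

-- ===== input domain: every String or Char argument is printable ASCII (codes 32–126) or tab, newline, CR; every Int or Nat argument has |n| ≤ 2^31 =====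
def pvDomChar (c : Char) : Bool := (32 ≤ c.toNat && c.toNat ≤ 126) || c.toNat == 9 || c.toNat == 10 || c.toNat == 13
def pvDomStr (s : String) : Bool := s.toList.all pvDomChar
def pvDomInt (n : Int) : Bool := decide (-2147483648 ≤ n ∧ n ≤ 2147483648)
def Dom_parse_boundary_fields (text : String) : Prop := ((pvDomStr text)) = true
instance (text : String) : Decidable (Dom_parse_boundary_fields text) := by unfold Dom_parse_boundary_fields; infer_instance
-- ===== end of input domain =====

-- B replaces A's fused forward loop with a reversed-scan first-match helper called once per field (objective: simpler decomposition).

-- ===== PORT A =====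
-- loop body of A's single for-loop, updating the pair (boundary_result, exception_note)
def pvA_step (st : String × String) (raw_line : String) : String × String :=
  let line := PySem.Str.strip raw_line
  let lower := PySem.Str.lower line
  -- line.split(":", 1)[1]: inside each branch the prefix guarantees a ':' and sep ≠ "", so the defaults are never used
  let st1 := if PySem.Str.startswith lower "- boundary result:" then
      (PySem.Str.strip ((PySem.List.pyGet? ((PySem.Str.splitMax? line ":" 1).getD []) 1).getD ""), st.2)
    else st
  if PySem.Str.startswith lower "- exception note:" then
      (st1.1, PySem.Str.strip ((PySem.List.pyGet? ((PySem.Str.splitMax? line ":" 1).getD []) 1).getD ""))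
    else st1

def parse_boundary_fields (text : String) : String × String :=
  (PySem.Str.splitlines text).foldl pvA_step ("", "")

-- ===== PORT B =====
-- first match while scanning the (already reversed) lines; "" if none
def pvB_lastValue (pre : String) : List String → String
  | [] => ""
  | raw_line :: rest =>
    let line := PySem.Str.strip raw_line
    if PySem.Str.startswith (PySem.Str.lower line) pre then
      PySem.Str.strip ((PySem.List.pyGet? ((PySem.Str.splitMax? line ":" 1).getD []) 1).getD "")
    else pvB_lastValue pre rest

def parse_boundary_fields_alt (text : String) : String × String :=
  let revLines := (PySem.Str.splitlines text).reverse
  (pvB_lastValue "- boundary result:" revLines, pvB_lastValue "- exception note:" revLines)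

-- ===== PRECONDITION & SPEC =====
def Spec_parse_boundary_fields (text : String) (out : String × String) : Prop := out = parse_boundary_fields_alt text
instance (text : String) (out : String × String) : Decidable (Spec_parse_boundary_fields text out) := by unfold Spec_parse_boundary_fields; infer_instance

-- ===== CLAIM (what is proved, stated in full; the proofs are below) =====
def Claim_equal_parse_boundary_fields : Prop := ∀ (text : String), Dom_parse_boundary_fields text → Spec_parse_boundary_fields text (parse_boundary_fields text)

-- ===== LEMMAS AND PROOFS =====
-- proof-side vocabulary: the per-line condition, extracted value, and accumulator update
def pvCond (p raw : String) : Bool :=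
  PySem.Str.startswith (PySem.Str.lower (PySem.Str.strip raw)) p

def pvVal (raw : String) : String :=
  PySem.Str.strip ((PySem.List.pyGet? ((PySem.Str.splitMax? (PySem.Str.strip raw) ":" 1).getD []) 1).getD "")

def pvUpd (p a raw : String) : String := if pvCond p raw then pvVal raw else a

-- pvB_lastValue generalized to an arbitrary default
def pvLastD (p a : String) : List String → String
  | [] => a
  | r :: rest => if pvCond p r then pvVal r else pvLastD p a rest

theorem pvA_step_eq (a b x : String) :
    pvA_step (a, b) x = (pvUpd "- boundary result:" a x, pvUpd "- exception note:" b x) := by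
  simp only [pvA_step, pvUpd, pvCond, pvVal]
  split_ifs <;> rfl

theorem pv_foldl_pair (l : List String) (a b : String) :
    List.foldl pvA_step (a, b) l
      = (List.foldl (pvUpd "- boundary result:") a l,
         List.foldl (pvUpd "- exception note:") b l) := by
  induction l generalizing a b with
  | nil => rfl
  | cons x xs ih => simp only [List.foldl_cons, pvA_step_eq, ih]

theorem pvLastD_append (u : List String) (p a x : String) :
    pvLastD p a (u ++ [x]) = pvLastD p (pvUpd p a x) u := by
  induction u with
  | nil => simp only [List.nil_append, pvLastD, pvUpd]
  | cons y ys ih => simp only [List.cons_append, pvLastD, ih]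

theorem pv_foldl_upd_rev (l : List String) (p a : String) :
    List.foldl (pvUpd p) a l = pvLastD p a l.reverse := by
  induction l generalizing a with
  | nil => rfl
  | cons x xs ih => rw [List.foldl_cons, ih, List.reverse_cons, pvLastD_append]

theorem pvLastD_eq_lastValue (l : List String) (p : String) :
    pvLastD p "" l = pvB_lastValue p l := by
  induction l with
  | nil => rfl
  | cons x xs ih => simp only [pvLastD, pvB_lastValue, pvCond, pvVal, ih]

-- ===== VERDICT (by name: the statement is the Claim_ definition above) =====
theorem parse_boundary_fields_spec : Claim_equal_parse_boundary_fields := by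
  intro text _
  unfold Spec_parse_boundary_fields parse_boundary_fields parse_boundary_fields_alt
  rw [pv_foldl_pair, pv_foldl_upd_rev, pv_foldl_upd_rev,
      pvLastD_eq_lastValue, pvLastD_eq_lastValue]
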